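-- pv_equiv track=rewrite | github.com/bbarclay/collatzconjecture | src/analysis/pattern_shift.py | get_tau
-- ===== SOURCE A (Python) =====
-- def get_tau(n):
--     """Calculate τ(n) for odd n"""
--     if n % 2 == 0:
--         raise ValueError("n must be odd")
--     x = 3 * n + 1
--     tau = 0
--     while x % 2 == 0:
--         tau += 1
--         x //= 2
--     return tau, x
-- ===== SOURCE B (Python) =====
-- def get_tau(n):
--     """Calculate τ(n) for odd n"""
--     if n % 2 == 0:
--         raise ValueError("n must be odd")
--     x = 3 * n + 1
--     tau = (x & -x).bit_length() - 1
--     return tau, x >> tau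
-- ===== Notes on version B (the rewrite author's own statement) =====
-- stated objective: idiomatic
-- what changed: Replaces the divide-by-2 while-loop with a closed-form bit computation: (x & -x).bit_length() - 1 reads the 2-adic valuation of x = 3n+1 directly and x >> tau gives the odd part, so no loop or accumulator is maintained.
import Mathlib
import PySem

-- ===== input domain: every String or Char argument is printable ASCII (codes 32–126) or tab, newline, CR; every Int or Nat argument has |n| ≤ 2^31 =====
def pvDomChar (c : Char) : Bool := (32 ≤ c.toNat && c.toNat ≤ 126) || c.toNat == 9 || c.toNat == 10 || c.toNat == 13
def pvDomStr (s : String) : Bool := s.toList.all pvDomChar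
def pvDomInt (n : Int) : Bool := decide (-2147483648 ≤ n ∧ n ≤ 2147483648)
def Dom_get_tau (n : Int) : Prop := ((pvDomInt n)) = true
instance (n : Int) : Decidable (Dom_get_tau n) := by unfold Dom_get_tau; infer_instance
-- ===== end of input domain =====

-- B replaces A's divide-by-2 while-loop with a closed-form bit computation
-- ((x & -x).bit_length() - 1 and a right shift); both raise ValueError on even n
-- (excluded by Pre_).

-- ===== PORT A =====
-- A's while loop; the 'x ≠ 0' conjunct is a totality guard only (A's x = 3*n+1
-- is never 0 for an integer n, nor is any of its halves).
def tauLoopA (x tau : Int) : Int × Int :=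
  if h : PySem.Int.mod x 2 = 0 ∧ x ≠ 0 then
    tauLoopA (PySem.Int.floordiv x 2) (tau + 1)
  else
    (tau, x)
termination_by x.natAbs
decreasing_by
  obtain ⟨h2, hx⟩ := h
  rw [(PySem.Int.mod_eq_zero_iff_dvd x 2).mp h2 |>.choose_spec]
  rw [PySem.Int.floordiv_eq_ediv_of_pos (by norm_num)]
  rw [Int.mul_ediv_cancel_left _ (by norm_num)]
  have hc : ((PySem.Int.mod_eq_zero_iff_dvd x 2).mp h2).choose ≠ 0 := by
    intro h0
    apply hx
    rw [(PySem.Int.mod_eq_zero_iff_dvd x 2).mp h2 |>.choose_spec, h0, mul_zero]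
  omega

def get_tau (n : Int) : Int × Int :=
  if PySem.Int.mod n 2 = 0 then (0, 0)   -- Python A raises ValueError here; excluded by Pre_
  else tauLoopA (3 * n + 1) 0

-- ===== PORT B =====
def get_tau_alt (n : Int) : Int × Int :=
  if PySem.Int.mod n 2 = 0 then (0, 0)   -- Python B raises ValueError here; excluded by Pre_
  else
    let x := 3 * n + 1
    let tau : Int := (PySem.Int.bitLength (PySem.Int.band x (-x)) : Int) - 1
    (tau, x >>> tau.toNat)

-- ===== PRECONDITION & SPEC =====
-- Pre_: exactly the inputs on which Python A returns (on even n it raises ValueError).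
def Pre_get_tau (n : Int) : Prop := PySem.Int.mod n 2 ≠ 0
instance (n : Int) : Decidable (Pre_get_tau n) := by unfold Pre_get_tau; infer_instance
def pvWitness_get_tau : Int := 7

def Spec_get_tau (n : Int) (out : Int × Int) : Prop := out = get_tau_alt n
instance (n : Int) (out : Int × Int) : Decidable (Spec_get_tau n out) := by unfold Spec_get_tau; infer_instance

-- ===== CLAIM (what is proved, stated in full; the proofs are below) =====
def Claim_equal_get_tau : Prop := ∀ (n : Int), Dom_get_tau n → Pre_get_tau n → Spec_get_tau n (get_tau n)

-- ===== LEMMAS AND PROOFS =====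

-- clearing the lowest set bit of an odd number: (2k+1) & 2k = 2k
theorem and_pred_odd (k : Nat) : (2*k+1) &&& (2*k) = 2*k := by
  apply Nat.eq_of_testBit_eq; intro j
  rw [Nat.testBit_and]
  cases j with
  | zero => simp
  | succ j =>
    rw [Nat.testBit_succ, Nat.testBit_succ]
    have h1 : (2*k+1)/2 = k := by omega
    have h2 : (2*k)/2 = k := by omega
    rw [h1, h2]; simp

-- clearing the lowest set bit commutes with halving
theorem and_pred_even (k : Nat) (h : 0 < k) : (2*k) &&& (2*k-1) = 2*(k &&& (k-1)) := by
  apply Nat.eq_of_testBit_eq; intro j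
  rw [Nat.testBit_and]
  cases j with
  | zero =>
    have : (2*(k &&& (k-1))).testBit 0 = false := by simp
    rw [this]; simp
  | succ j =>
    rw [Nat.testBit_succ, Nat.testBit_succ, Nat.testBit_succ]
    have h1 : (2*k)/2 = k := by omega
    have h2 : (2*k-1)/2 = k-1 := by omega
    have h3 : (2*(k &&& (k-1)))/2 = k &&& (k-1) := by omega
    rw [h1, h2, h3, Nat.testBit_and]

theorem shiftR_two_mul (y : Int) (s : Nat) : (2*y) >>> (s+1) = y >>> s := by
  rw [Int.shiftRight_eq_div_pow, Int.shiftRight_eq_div_pow, pow_succ]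
  push_cast
  rw [mul_comm ((2:Int)^s) 2, Int.mul_ediv_mul_of_pos y ((2:Int)^s) (by norm_num : (0:Int) < 2)]

theorem shiftR_zero (y : Int) : y >>> (0:Nat) = y := by
  rw [Int.shiftRight_eq_div_pow]; simp

-- x & -x in terms of |x| (Python's two's-complement & collapses to the same Nat expression on both signs)
theorem band_neg_self (x : Int) (hx : x ≠ 0) :
    PySem.Int.band x (-x) = ((x.natAbs - (x.natAbs &&& (x.natAbs - 1)) : Nat) : Int) := by
  rcases lt_trichotomy x 0 with h | h | h
  · have h1 : ¬ (0 ≤ x) := by omega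
    have h2 : (0:Int) ≤ -x := by omega
    simp only [PySem.Int.band, h1, h2, if_true, if_false]
    congr 2
    · omega
    · congr 1 <;> omega
  · exact absurd h hx
  · have h1 : (0:Int) ≤ x := by omega
    have h2 : ¬ ((0:Int) ≤ -x) := by omega
    simp only [PySem.Int.band, h1, h2, if_true, if_false]
    congr 2
    · omega
    · congr 1 <;> omega

theorem band_neg_self_odd (x : Int) (h : PySem.Int.mod x 2 ≠ 0) : PySem.Int.band x (-x) = 1 := by
  have hx : x ≠ 0 := by rintro rfl; simp [PySem.Int.mod] at h
  rw [band_neg_self x hx]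
  have hm : x.natAbs % 2 = 1 := by
    rw [PySem.Int.mod_eq_emod_of_pos (by norm_num)] at h
    omega
  obtain ⟨k, hk⟩ : ∃ k, x.natAbs = 2*k+1 := ⟨x.natAbs / 2, by omega⟩
  rw [hk]
  have : 2*k+1-1 = 2*k := by omega
  rw [this, and_pred_odd]
  omega

theorem band_neg_self_even (x : Int) (hx : x ≠ 0) (h : PySem.Int.mod x 2 = 0) :
    PySem.Int.band x (-x) = 2 * PySem.Int.band (PySem.Int.floordiv x 2) (-(PySem.Int.floordiv x 2)) := by
  obtain ⟨y, rfl⟩ := (PySem.Int.mod_eq_zero_iff_dvd x 2).mp h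
  have hy : y ≠ 0 := by rintro rfl; simp at hx
  have hfd : PySem.Int.floordiv (2*y) 2 = y := by
    rw [PySem.Int.floordiv_eq_ediv_of_pos (by norm_num), Int.mul_ediv_cancel_left _ (by norm_num)]
  rw [hfd, band_neg_self _ hx, band_neg_self y hy]
  have hna : (2*y).natAbs = 2 * y.natAbs := by simp [Int.natAbs_mul]
  rw [hna]
  have hk : 0 < y.natAbs := by omega
  rw [and_pred_even y.natAbs hk]
  have hle : y.natAbs &&& (y.natAbs - 1) ≤ y.natAbs - 1 := Nat.and_le_right
  omega

theorem band_neg_self_pos (x : Int) (hx : x ≠ 0) : 0 < PySem.Int.band x (-x) := by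
  rw [band_neg_self x hx]
  have h1 : x.natAbs &&& (x.natAbs - 1) ≤ x.natAbs - 1 := Nat.and_le_right
  have h2 : 0 < x.natAbs := by omega
  omega

theorem bitLength_pos (z : Int) (hz : 0 < z) : 0 < PySem.Int.bitLength z := by
  have h1 := PySem.Int.lt_two_pow_bitLength z
  have h2 : 0 < z.natAbs := by omega
  by_contra h
  have : PySem.Int.bitLength z = 0 := by omega
  rw [this] at h1
  omega

-- A's loop computes B's closed form: tau is the 2-adic valuation, read off via x & -x.
theorem tauLoop_eq (x t : Int) (hx : x ≠ 0) :
    tauLoopA x t = (t + ((PySem.Int.bitLength (PySem.Int.band x (-x)) : Int) - 1),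
                    x >>> (((PySem.Int.bitLength (PySem.Int.band x (-x)) : Int) - 1).toNat)) := by
  by_cases h : PySem.Int.mod x 2 = 0
  · obtain ⟨y, rfl⟩ := (PySem.Int.mod_eq_zero_iff_dvd x 2).mp h
    have hy : y ≠ 0 := by rintro rfl; simp at hx
    have hfd : PySem.Int.floordiv (2*y) 2 = y := by
      rw [PySem.Int.floordiv_eq_ediv_of_pos (by norm_num), Int.mul_ediv_cancel_left _ (by norm_num)]
    have hrec : tauLoopA (2*y) t = tauLoopA y (t+1) := by
      rw [tauLoopA]
      simp only [h, hx, ne_eq, not_false_iff, and_true, dif_pos, hfd]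
    have hband := band_neg_self_even (2*y) hx h
    rw [hfd] at hband
    set z := PySem.Int.band y (-y) with hz
    have hzpos : 0 < z := band_neg_self_pos y hy
    have hbl : PySem.Int.bitLength (PySem.Int.band (2*y) (-(2*y))) = PySem.Int.bitLength z + 1 := by
      rw [hband, PySem.Int.bitLength_of_pos (n := 2*z) (by omega)]
      congr 1
      rw [PySem.Int.floordiv_eq_ediv_of_pos (by norm_num), Int.mul_ediv_cancel_left _ (by norm_num)]
    have hblpos : 0 < PySem.Int.bitLength z := bitLength_pos z hzpos
    rw [hrec, tauLoop_eq y (t+1) hy, hbl, Prod.mk.injEq]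
    constructor
    · rw [← hz]; push_cast; ring_nf
    · have h1 : (((PySem.Int.bitLength z : Int) + 1) - 1).toNat = PySem.Int.bitLength z := by omega
      have h2 : ((PySem.Int.bitLength z : Int) - 1).toNat = PySem.Int.bitLength z - 1 := by omega
      rw [← hz]
      push_cast
      rw [h1, h2]
      conv_rhs => rw [show PySem.Int.bitLength z = (PySem.Int.bitLength z - 1) + 1 by omega,
        shiftR_two_mul]
  · have hstop : tauLoopA x t = (t, x) := by
      rw [tauLoopA]
      simp only [h, false_and, dif_neg, not_false_iff]
    have hband := band_neg_self_odd x h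
    rw [hstop, hband]
    have hbl : PySem.Int.bitLength 1 = 1 := by decide
    rw [hbl]
    norm_num [shiftR_zero]
termination_by x.natAbs
decreasing_by
  have : (2*y).natAbs = 2 * y.natAbs := by simp [Int.natAbs_mul]
  omega

-- ===== VERDICT (by name: the statement is the Claim_ definition above) =====
theorem get_tau_spec : Claim_equal_get_tau := by
  intro n _ hpre
  unfold Spec_get_tau get_tau get_tau_alt
  rw [if_neg hpre, if_neg hpre]
  have hx : (3*n + 1) ≠ 0 := by intro h0; omega
  exact (tauLoop_eq (3*n+1) 0 hx).trans (by norm_num)
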